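-- pv_equiv track=rewrite | github.com/Hyojeong721/TIL | SWA/0810/haeri.lim.lhr/1208_flatten/s1.py | dump
-- ===== SOURCE A (Python) =====
-- def dump(dump_count, box):
--     # 덤프 시킨 횟수를 저장하는 count 선언
--     count = 0
--
--     # 최대 dump_count만큼 반복 시행
--     while count < dump_count:
--         # 가장 박스가 많은 값 max_box, 적은 값 min_box
--         max_box = max(box)
--         min_box = min(box)
--
--         # 각각의 값에 해당하는 인덱스 max_box_index, min_box_index
--         max_box_index = box.index(max_box)
--         min_box_index = box.index(min_box)
--
--         # 해당 인덱스의 값 변경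
--         box[max_box_index] -= 1
--         box[min_box_index] += 1
--
--         # 덤프 시행 횟수 1 추가
--         count += 1
--
--         # 덤프 시행 후 최대값과 최소값의 차이 result 저장
--         result = max(box) - min(box)
--
--         # 만약 dump_count전 평탄화 완료시 반복문 탈출
--         if result == 0 or result == 1:
--             return result
--
--     return result
-- ===== SOURCE B (Python) =====
-- def dump(dump_count, box):
--     # Same return value as A; works on a sorted copy, so it does not mutate `box`
--     # (A mutates its argument in place; equivalence claimed for the return value).
--     b = sorted(box)
--     for _ in range(dump_count):
--         d = b[-1] - b[0]
--         if d <= 1: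
--             return d
--         i = b.index(b[-1])       # leftmost maximum
--         j = b.count(b[0]) - 1    # rightmost minimum
--         b[i] -= 1
--         b[j] += 1
--     return b[-1] - b[0]
-- ===== Notes on version B (the rewrite author's own statement) =====
-- stated objective: alternative
-- what changed: B sorts the list once and maintains the sorted order, reading max/min in O(1) from the two ends and moving a unit from the leftmost maximum to the rightmost minimum, instead of re-scanning the unsorted list with max/min/index/max/min on every dump; B works on a sorted copy and does not mutate the argument (A mutates box in place; the claim is about the return value).
import Mathlib
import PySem

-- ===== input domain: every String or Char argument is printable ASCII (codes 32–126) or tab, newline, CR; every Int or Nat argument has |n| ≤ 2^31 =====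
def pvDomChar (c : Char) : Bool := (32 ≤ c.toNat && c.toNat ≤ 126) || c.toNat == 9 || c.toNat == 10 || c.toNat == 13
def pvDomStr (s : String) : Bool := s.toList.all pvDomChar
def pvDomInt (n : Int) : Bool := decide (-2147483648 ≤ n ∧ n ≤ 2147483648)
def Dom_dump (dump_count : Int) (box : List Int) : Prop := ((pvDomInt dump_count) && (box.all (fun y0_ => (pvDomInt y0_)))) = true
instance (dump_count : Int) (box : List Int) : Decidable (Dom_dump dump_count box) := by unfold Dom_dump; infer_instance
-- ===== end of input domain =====

-- B sorts once and keeps the list sorted, moving a unit between the two ends instead of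
-- re-scanning with max/min/index each dump (objective: alternative). A mutates `box` in place
-- and B does not; the equivalence proved here is about the RETURN value only.

-- ===== PORT A =====
-- the while-loop of A; fuel = dump_count - count; the third argument is A's `result` variable
def dumpLoopA : Nat → List Int → Int → Int
  | 0, _, result => result
  | Nat.succ f, box, _ =>
    let max_box := (PySem.List.max? box (fun y => y)).getD 0        -- max(box); box ≠ [] under Pre_
    let min_box := (PySem.List.min? box (fun y => y)).getD 0        -- min(box)
    let max_box_index := (PySem.List.index? box max_box).getD 0     -- box.index(max_box): always found
    let min_box_index := (PySem.List.index? box min_box).getD 0     -- box.index(min_box)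
    let box1 := box.set max_box_index (box.getD max_box_index 0 - 1)  -- box[max_box_index] -= 1 (index in range)
    let box2 := box1.set min_box_index (box1.getD min_box_index 0 + 1) -- box[min_box_index] += 1
    let result := (PySem.List.max? box2 (fun y => y)).getD 0 - (PySem.List.min? box2 (fun y => y)).getD 0
    if result = 0 ∨ result = 1 then result else dumpLoopA f box2 result

def dump (dump_count : Int) (box : List Int) : Int :=
  dumpLoopA dump_count.toNat box 0   -- `result` is unassigned before the loop; 0 placeholder, unreachable under Pre_

-- ===== PORT B =====
-- the for-loop of B over a sorted working copy b
def dumpLoopB : Nat → List Int → Int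
  | 0, b => PySem.List.pyGetD b (-1) 0 - b.getD 0 0                  -- return b[-1] - b[0]
  | Nat.succ f, b =>
    let d := PySem.List.pyGetD b (-1) 0 - b.getD 0 0                 -- d = b[-1] - b[0]
    if d ≤ 1 then d
    else
      let i := (PySem.List.index? b (PySem.List.pyGetD b (-1) 0)).getD 0  -- i = b.index(b[-1])
      let j := PySem.List.count b (b.getD 0 0) - 1                   -- j = b.count(b[0]) - 1
      let b1 := b.set i (b.getD i 0 - 1)                             -- b[i] -= 1
      dumpLoopB f (b1.set j (b1.getD j 0 + 1))                       -- b[j] += 1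

def dump_alt (dump_count : Int) (box : List Int) : Int :=
  dumpLoopB dump_count.toNat (PySem.List.sorted box (fun y => y) false)

-- ===== PRECONDITION & SPEC =====
-- Pre_ excludes dump_count ≤ 0 (A's `result` is never assigned: UnboundLocalError) and the
-- empty list (max([]) raises ValueError); A raises on every excluded input.
def Pre_dump (dump_count : Int) (box : List Int) : Prop := 1 ≤ dump_count ∧ box ≠ []
instance (dump_count : Int) (box : List Int) : Decidable (Pre_dump dump_count box) := by unfold Pre_dump; infer_instance
def pvWitness_dump : Int × List Int := (2, [3, 1, 1])

def Spec_dump (dump_count : Int) (box : List Int) (out : Int) : Prop := out = dump_alt dump_count box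
instance (dump_count : Int) (box : List Int) (out : Int) : Decidable (Spec_dump dump_count box out) := by unfold Spec_dump; infer_instance

-- ===== CLAIM (what is proved, stated in full; the proofs are below) =====
def Claim_equal_dump : Prop := ∀ (dump_count : Int) (box : List Int), Dom_dump dump_count box → Pre_dump dump_count box → Spec_dump dump_count box (dump dump_count box)

-- ===== LEMMAS AND PROOFS =====

theorem pv_head_le_mem {b : List Int} (hs : b.Pairwise (· ≤ ·)) (hb : b ≠ []) {y : Int} (hy : y ∈ b) :
    b.head hb ≤ y := by
  cases b with
  | nil => exact absurd rfl hb
  | cons x t =>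
    rcases List.mem_cons.mp hy with h | h
    · simp [h]
    · simpa using (List.pairwise_cons.mp hs).1 y h

theorem pv_mem_le_getLast {b : List Int} (hs : b.Pairwise (· ≤ ·)) (hb : b ≠ []) {y : Int} (hy : y ∈ b) :
    y ≤ b.getLast hb := by
  rw [List.getLast_eq_getElem]
  obtain ⟨p, hp, rfl⟩ := List.mem_iff_getElem.mp hy
  rcases Nat.lt_or_ge p (b.length - 1) with h | h
  · exact List.pairwise_iff_getElem.mp hs p (b.length - 1) hp (by omega) h
  · have : p = b.length - 1 := by omega
    subst this; exact le_refl _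

theorem pv_max_eq {box b : List Int} (hp : b.Perm box) (hs : b.Pairwise (· ≤ ·)) (hb : b ≠ []) :
    (PySem.List.max? box (fun y => y)).getD 0 = b.getLast hb := by
  cases hm : PySem.List.max? box (fun y => y) with
  | none =>
    have : box = [] := (PySem.List.max?_eq_none_iff box _).mp hm
    subst this
    exact absurd hp.eq_nil hb
  | some m =>
    have hmem : m ∈ b := (hp.mem_iff).mpr (PySem.List.max?_mem hm)
    have h1 : m ≤ b.getLast hb := pv_mem_le_getLast hs hb hmem
    have h2 : b.getLast hb ≤ m :=
      PySem.List.max?_isMax hm _ (hp.mem_iff.mp (List.getLast_mem hb))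
    simpa using le_antisymm h1 h2

theorem pv_min_eq {box b : List Int} (hp : b.Perm box) (hs : b.Pairwise (· ≤ ·)) (hb : b ≠ []) :
    (PySem.List.min? box (fun y => y)).getD 0 = b.head hb := by
  cases hm : PySem.List.min? box (fun y => y) with
  | none =>
    have : box = [] := (PySem.List.min?_eq_none_iff box _).mp hm
    subst this
    exact absurd hp.eq_nil hb
  | some m =>
    have hmem : m ∈ b := (hp.mem_iff).mpr (PySem.List.min?_mem hm)
    have h1 : b.head hb ≤ m := pv_head_le_mem hs hb hmem
    have h2 : m ≤ b.head hb :=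
      PySem.List.min?_isMin hm _ (hp.mem_iff.mp (List.head_mem hb))
    simpa using le_antisymm h2 h1

theorem pv_getD_zero {b : List Int} (hb : b ≠ []) : b.getD 0 0 = b.head hb := by
  cases b with
  | nil => exact absurd rfl hb
  | cons x t => rfl

theorem pv_sorted_min_prefix {b : List Int} (hs : b.Pairwise (· ≤ ·)) {mn : Int}
    (hmin : ∀ y ∈ b, mn ≤ y) : ∀ p (hp : p < b.length), b[p] = mn ↔ p < b.count mn := by
  induction b with
  | nil => intro p hp; simp at hp
  | cons x t ih =>
    obtain ⟨hx, ht⟩ := List.pairwise_cons.mp hs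
    intro p hp
    by_cases hxm : x = mn
    · subst hxm
      cases p with
      | zero => simp
      | succ p =>
        have hrec := ih ht (fun y hy => hmin y (List.mem_cons_of_mem _ hy)) p
          (by simpa using Nat.lt_of_succ_lt_succ hp)
        simpa [List.count_cons] using hrec
    · have hlt : mn < x := lt_of_le_of_ne (hmin x List.mem_cons_self) (Ne.symm hxm)
      have hcount : (x :: t).count mn = 0 := by
        rw [List.count_eq_zero]
        intro hmem
        rcases List.mem_cons.mp hmem with h | h
        · exact hxm h.symm
        · exact absurd (hx mn h) (not_le.mpr hlt)
      rw [hcount]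
      simp only [Nat.not_lt_zero, iff_false]
      cases p with
      | zero => simpa using hxm
      | succ p =>
        have hpt : p < t.length := by simpa using Nat.lt_of_succ_lt_succ hp
        have : x ≤ t[p] := hx _ (List.getElem_mem hpt)
        simpa using ne_of_gt (lt_of_lt_of_le hlt this)

theorem pv_set_multiset (l : List Int) (q : Nat) (hq : q < l.length) (v : Int) :
    ∃ E : Multiset Int, (l : Multiset Int) = l[q] ::ₘ E ∧ ((l.set q v : List Int) : Multiset Int) = v ::ₘ E := by
  refine ⟨(l.eraseIdx q : Multiset Int), ?_, ?_⟩
  · rw [Multiset.cons_coe, Multiset.coe_eq_coe]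
    exact (List.getElem_cons_eraseIdx_perm hq).symm
  · rw [Multiset.cons_coe, Multiset.coe_eq_coe]
    exact List.set_perm_cons_eraseIdx hq v

theorem pv_two_set_perm {l l' : List Int} {mx mn w1 w2 : Int}
    {p q : Nat} (hp : p < l.length) (hq : q < l.length)
    (hvp : l[p] = mx) (hvq : (l.set p w1)[q]'(by simpa using hq) = mn)
    {p' q' : Nat} (hp' : p' < l'.length) (hq' : q' < l'.length)
    (hvp' : l'[p'] = mx) (hvq' : (l'.set p' w1)[q']'(by simpa using hq') = mn)
    (hperm : l.Perm l') :
    ((l.set p w1).set q w2).Perm ((l'.set p' w1).set q' w2) := by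
  obtain ⟨E1, e11, e12⟩ := pv_set_multiset l p hp w1
  obtain ⟨F1, f11, f12⟩ := pv_set_multiset l' p' hp' w1
  rw [hvp] at e11; rw [hvp'] at f11
  have hcoe : (l : Multiset Int) = (l' : Multiset Int) := Multiset.coe_eq_coe.mpr hperm
  have hE1F1 : E1 = F1 := (Multiset.cons_inj_right mx).mp (by rw [← e11, ← f11, hcoe])
  have hset1 : ((l.set p w1 : List Int) : Multiset Int) = ((l'.set p' w1 : List Int) : Multiset Int) := by
    rw [e12, f12, hE1F1]
  obtain ⟨E2, e21, e22⟩ := pv_set_multiset (l.set p w1) q (by simpa using hq) w2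
  obtain ⟨F2, f21, f22⟩ := pv_set_multiset (l'.set p' w1) q' (by simpa using hq') w2
  rw [hvq] at e21; rw [hvq'] at f21
  have hE2F2 : E2 = F2 := (Multiset.cons_inj_right mn).mp (by rw [← e21, ← f21, hset1])
  exact Multiset.coe_eq_coe.mp (by rw [e22, f22, hE2F2])

theorem pv_perm_ne_nil {l l' : List Int} (h : l.Perm l') (hl : l ≠ []) : l' ≠ [] := by
  intro hn; subst hn; exact hl h.eq_nil

theorem pv_B_flat (f : Nat) (b : List Int) (hb : b ≠ [])
    (hd : b.getLast hb - b.head hb ≤ 1) :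
    dumpLoopB (f + 1) b = b.getLast hb - b.head hb := by
  simp only [dumpLoopB]
  rw [PySem.List.pyGetD_neg_one b 0 hb, pv_getD_zero hb]
  rw [if_pos hd]

theorem pv_flat (f : Nat) (box b : List Int) (r : Int) (hb : b ≠ [])
    (hp : b.Perm box) (hs : b.Pairwise (· ≤ ·))
    (hd : b.getLast hb - b.head hb ≤ 1) :
    dumpLoopA (f + 1) box r = b.getLast hb - b.head hb := by
  have hbox : box ≠ [] := pv_perm_ne_nil hp hb
  have hHL : b.head hb ≤ b.getLast hb := pv_head_le_mem hs hb (List.getLast_mem hb)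
  have hmax := pv_max_eq hp hs hb
  have hmin := pv_min_eq hp hs hb
  have hLbox : b.getLast hb ∈ box := hp.mem_iff.mp (List.getLast_mem hb)
  have hHbox : b.head hb ∈ box := hp.mem_iff.mp (List.head_mem hb)
  obtain ⟨mi, hmi⟩ := Option.isSome_iff_exists.mp ((PySem.List.index?_isSome_iff box _).mpr hLbox)
  obtain ⟨hmilt, hboxmi, hmifirst⟩ := PySem.List.getElem_of_index?_eq_some hmi
  obtain ⟨ni, hni⟩ := Option.isSome_iff_exists.mp ((PySem.List.index?_isSome_iff box _).mpr hHbox)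
  obtain ⟨hnilt, hboxni, hnifirst⟩ := PySem.List.getElem_of_index?_eq_some hni
  simp only [dumpLoopA]
  rw [hmax, hmin, hmi, hni]
  simp only [Option.getD_some]
  rw [List.getD_eq_getElem box 0 hmilt, hboxmi]
  rcases (by omega : b.getLast hb = b.head hb ∨ b.getLast hb = b.head hb + 1) with hLH | hLH
  · -- all elements equal: both indices coincide and the two writes cancel
    have hnieq : ni = mi := by
      rw [hLH] at hmi; rw [hmi] at hni; exact (Option.some_inj.mp hni).symm
    subst hnieq
    rw [List.getD_eq_getElem _ 0 (by simpa using hnilt), List.getElem_set]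
    rw [if_pos rfl, List.set_set]
    have hcancel : b.getLast hb - 1 + 1 = b.getLast hb := by ring
    rw [hcancel]
    have hid : box.set ni (b.getLast hb) = box := by
      rw [← hboxmi]; exact List.set_getElem_self hmilt
    rw [hid, hmax, hmin, if_pos (Or.inl (by omega))]
  · -- diff exactly 1: the write swaps one min and one max, the multiset is unchanged
    have hmine : mi ≠ ni := by
      intro h; subst h
      have e : box[mi]'hmilt = box[mi]'hnilt := rfl
      omega
    rw [List.getD_eq_getElem _ 0 (by simpa using hnilt), List.getElem_set, if_neg hmine, hboxni]
    have hperm2 : ((box.set mi (b.getLast hb - 1)).set ni (b.head hb + 1)).Perm box := by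
      obtain ⟨E1, e11, e12⟩ := pv_set_multiset box mi hmilt (b.getLast hb - 1)
      rw [hboxmi] at e11
      obtain ⟨E2, e21, e22⟩ := pv_set_multiset (box.set mi (b.getLast hb - 1)) ni
        (by simpa using hnilt) (b.head hb + 1)
      have hb1ni : (box.set mi (b.getLast hb - 1))[ni]'(by simpa using hnilt) = b.head hb := by
        rw [List.getElem_set, if_neg hmine, hboxni]
      rw [hb1ni] at e21
      have e12' : ((box.set mi (b.getLast hb - 1) : List Int) : Multiset Int) = b.head hb ::ₘ E1 := by
        rw [e12]; congr 1; omega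
      have hE : E2 = E1 := (Multiset.cons_inj_right _).mp (e21.symm.trans e12')
      apply Multiset.coe_eq_coe.mp
      rw [e22, hE, e11]
      congr 1; omega
    have hp2 : b.Perm ((box.set mi (b.getLast hb - 1)).set ni (b.head hb + 1)) :=
      hp.trans hperm2.symm
    rw [pv_max_eq hp2 hs hb, pv_min_eq hp2 hs hb, if_pos (Or.inr (by omega))]

theorem pv_step (box b : List Int) (hb : b ≠ []) (hp : b.Perm box) (hs : b.Pairwise (· ≤ ·))
    (hd : ¬ (b.getLast hb - b.head hb ≤ 1)) :
    ∃ (box2 b2 : List Int) (hb2 : b2 ≠ []),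
      b2.Perm box2 ∧ b2.Pairwise (· ≤ ·) ∧
      (∀ f r, dumpLoopA (f + 1) box r =
        if b2.getLast hb2 - b2.head hb2 = 0 ∨ b2.getLast hb2 - b2.head hb2 = 1
        then b2.getLast hb2 - b2.head hb2
        else dumpLoopA f box2 (b2.getLast hb2 - b2.head hb2)) ∧
      (∀ f, dumpLoopB (f + 1) b = dumpLoopB f b2) := by
  have hbox : box ≠ [] := pv_perm_ne_nil hp hb
  have hd' : b.head hb + 2 ≤ b.getLast hb := by omega
  have hmax := pv_max_eq hp hs hb
  have hmin := pv_min_eq hp hs hb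
  -- A-side indices
  have hLbox : b.getLast hb ∈ box := hp.mem_iff.mp (List.getLast_mem hb)
  have hHbox : b.head hb ∈ box := hp.mem_iff.mp (List.head_mem hb)
  obtain ⟨mi, hmi⟩ := Option.isSome_iff_exists.mp ((PySem.List.index?_isSome_iff box _).mpr hLbox)
  obtain ⟨hmilt, hboxmi, hmifirst⟩ := PySem.List.getElem_of_index?_eq_some hmi
  obtain ⟨ni, hni⟩ := Option.isSome_iff_exists.mp ((PySem.List.index?_isSome_iff box _).mpr hHbox)
  obtain ⟨hnilt, hboxni, hnifirst⟩ := PySem.List.getElem_of_index?_eq_some hni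
  have hmine : mi ≠ ni := by
    intro h; subst h
    have e : box[mi]'hmilt = box[mi]'hnilt := rfl
    omega
  -- B-side indices
  obtain ⟨i, hi⟩ := Option.isSome_iff_exists.mp
    ((PySem.List.index?_isSome_iff b _).mpr (List.getLast_mem hb))
  obtain ⟨hilt, hbi, hifirst⟩ := PySem.List.getElem_of_index?_eq_some hi
  have hlow : ∀ y ∈ b, b.head hb ≤ y := fun y hy => pv_head_le_mem hs hb hy
  have hprefix := pv_sorted_min_prefix hs hlow
  have hc1 : 0 < b.count (b.head hb) := List.count_pos_iff.mpr (List.head_mem hb)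
  have hcle : b.count (b.head hb) ≤ b.length := List.count_le_length
  have hjlt : b.count (b.head hb) - 1 < b.length := by omega
  have hbj : b[b.count (b.head hb) - 1]'hjlt = b.head hb :=
    (hprefix _ hjlt).mpr (by omega)
  have hine : i ≠ b.count (b.head hb) - 1 := by
    intro h
    have e : b[i]'hilt = b[b.count (b.head hb) - 1]'hjlt := by congr 1
    rw [hbi, hbj] at e; omega
  have hji : b.count (b.head hb) - 1 < i := by
    rcases Nat.lt_or_ge (b.count (b.head hb) - 1) i with h | h
    · exact h
    · exfalso
      have hlt : i < b.count (b.head hb) - 1 := by omega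
      have := List.pairwise_iff_getElem.mp hs i _ hilt hjlt hlt
      rw [hbi, hbj] at this; omega
  -- invariants of the two next states
  have hb2 : (b.set i (b.getLast hb - 1)).set (b.count (b.head hb) - 1) (b.head hb + 1) ≠ [] := by
    intro h
    have hlen : ((b.set i (b.getLast hb - 1)).set (b.count (b.head hb) - 1) (b.head hb + 1)).length
        = b.length := by simp
    rw [h] at hlen
    exact hb (List.length_eq_zero_iff.mp hlen.symm)
  have hp2 : ((b.set i (b.getLast hb - 1)).set (b.count (b.head hb) - 1) (b.head hb + 1)).Perm
      ((box.set mi (b.getLast hb - 1)).set ni (b.head hb + 1)) :=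
    pv_two_set_perm (mx := b.getLast hb) (mn := b.head hb) hilt hjlt hbi
      (by rw [List.getElem_set, if_neg hine]; exact hbj)
      hmilt hnilt hboxmi
      (by rw [List.getElem_set, if_neg hmine]; exact hboxni)
      hp
  have hs2 : ((b.set i (b.getLast hb - 1)).set (b.count (b.head hb) - 1) (b.head hb + 1)).Pairwise (· ≤ ·) := by
    rw [List.pairwise_iff_getElem]
    intro p q hp' hq' hpq
    have hplen : p < b.length := by simpa using hp'
    have hqlen : q < b.length := by simpa using hq'
    have hmono := List.pairwise_iff_getElem.mp hs
    have hlow' : ∀ p (h : p < b.length), b.head hb ≤ b[p] := fun p h => hlow _ (List.getElem_mem h)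
    have hhigh : ∀ p (h : p < b.length), b[p] ≤ b.getLast hb := fun p h =>
      pv_mem_le_getLast hs hb (List.getElem_mem h)
    simp only [List.getElem_set]
    by_cases h1 : b.count (b.head hb) - 1 = p
    · rw [if_pos h1]
      by_cases h2 : b.count (b.head hb) - 1 = q
      · omega
      · rw [if_neg h2]
        by_cases h3 : i = q
        · rw [if_pos h3]; omega
        · rw [if_neg h3]
          have hne : b[q]'hqlen ≠ b.head hb := by
            intro e
            have := (hprefix q hqlen).mp e
            omega
          have := hlow' q hqlen
          omega
    · rw [if_neg h1]
      by_cases h2 : i = p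
      · rw [if_pos h2]
        by_cases h3 : b.count (b.head hb) - 1 = q
        · omega
        · rw [if_neg h3]
          by_cases h4 : i = q
          · omega
          · rw [if_neg h4]
            have := hmono i q hilt hqlen (by omega)
            rw [hbi] at this
            omega
      · rw [if_neg h2]
        by_cases h3 : b.count (b.head hb) - 1 = q
        · rw [if_pos h3]
          have := hmono p (b.count (b.head hb) - 1) hplen hjlt (by omega)
          rw [hbj] at this
          omega
        · rw [if_neg h3]
          by_cases h4 : i = q
          · rw [if_pos h4]
            have hne : b[p]'hplen ≠ b.getLast hb := by
              have := hifirst p (by omega)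
              simpa using this
            have := hhigh p hplen
            omega
          · rw [if_neg h4]
            exact hmono p q hplen hqlen hpq
  refine ⟨(box.set mi (b.getLast hb - 1)).set ni (b.head hb + 1),
    (b.set i (b.getLast hb - 1)).set (b.count (b.head hb) - 1) (b.head hb + 1),
    hb2, hp2, hs2, ?_, ?_⟩
  · -- A's loop body
    intro f r
    simp only [dumpLoopA]
    rw [hmax, hmin, hmi, hni]
    simp only [Option.getD_some]
    rw [List.getD_eq_getElem box 0 hmilt, hboxmi]
    rw [List.getD_eq_getElem _ 0 (by simpa using hnilt), List.getElem_set, if_neg hmine, hboxni]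
    rw [pv_max_eq hp2 hs2 hb2, pv_min_eq hp2 hs2 hb2]
  · -- B's loop body
    intro f
    simp only [dumpLoopB]
    rw [PySem.List.pyGetD_neg_one b 0 hb, pv_getD_zero hb]
    rw [if_neg hd, hi]
    simp only [Option.getD_some]
    rw [PySem.List.count_eq]
    rw [List.getD_eq_getElem b 0 hilt, hbi]
    rw [List.getD_eq_getElem _ 0 (by simpa using hjlt), List.getElem_set, if_neg hine, hbj]

theorem pv_loop (f : Nat) : ∀ (box b : List Int) (r : Int) (_hb : b ≠ []),
    b.Perm box → b.Pairwise (· ≤ ·) →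
    dumpLoopA (f + 1) box r = dumpLoopB (f + 1) b := by
  induction f with
  | zero =>
    intro box b r hb hp hs
    by_cases hd : b.getLast hb - b.head hb ≤ 1
    · rw [pv_flat 0 box b r hb hp hs hd, pv_B_flat 0 b hb hd]
    · obtain ⟨box2, b2, hb2, hp2, hs2, hA, hB⟩ := pv_step box b hb hp hs hd
      rw [hA 0 r, hB 0]
      have hR0 : dumpLoopB 0 b2 = b2.getLast hb2 - b2.head hb2 := by
        simp only [dumpLoopB]
        rw [PySem.List.pyGetD_neg_one b2 0 hb2, pv_getD_zero hb2]
      rw [hR0]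
      split_ifs <;> simp [dumpLoopA]
  | succ f ih =>
    intro box b r hb hp hs
    by_cases hd : b.getLast hb - b.head hb ≤ 1
    · rw [pv_flat (f + 1) box b r hb hp hs hd, pv_B_flat (f + 1) b hb hd]
    · obtain ⟨box2, b2, hb2, hp2, hs2, hA, hB⟩ := pv_step box b hb hp hs hd
      rw [hA (f + 1) r, hB (f + 1)]
      by_cases hd2 : b2.getLast hb2 - b2.head hb2 ≤ 1
      · have h0 : 0 ≤ b2.getLast hb2 - b2.head hb2 := by
          have := pv_head_le_mem hs2 hb2 (List.getLast_mem hb2)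
          omega
        rw [if_pos (by omega), pv_B_flat f b2 hb2 hd2]
      · rw [if_neg (by omega)]
        exact ih box2 b2 _ hb2 hp2 hs2

-- ===== VERDICT (by name: the statement is the Claim_ definition above) =====
theorem dump_spec : Claim_equal_dump := by
  intro dc box _ hpre
  obtain ⟨h1, hne⟩ := hpre
  unfold Spec_dump dump dump_alt
  have hperm : (PySem.List.sorted box (fun y => y) false).Perm box :=
    PySem.List.sorted_perm box _ _
  have hbne : PySem.List.sorted box (fun y => y) false ≠ [] := pv_perm_ne_nil hperm.symm hne
  have hsort : (PySem.List.sorted box (fun y => y) false).Pairwise (· ≤ ·) := by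
    simpa using PySem.List.sorted_pairwise box (fun y => y)
  have hfuel : dc.toNat = (dc.toNat - 1) + 1 := by omega
  rw [hfuel]
  exact pv_loop _ box _ 0 hbne hperm hsort
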